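-- pv_equiv track=rewrite | github.com/DoMo-98/My-Algorithms | hackerrank/best_subset_matrix.py | get_sum_bestdiagonalset
-- ===== SOURCE A (Python) =====
-- def get_sum_bestdiagonalset( matrix ):
--     length = len( matrix ) - 1
--     max_numbers = []
--
--     for i in range( len( matrix ) // 2 + 1 ):
--         max_numbers.append( max( [ matrix[i][i], matrix[i][ length - i ], matrix[ length - i ][i], matrix[ length - i ][ length - i ] ] ) )
--         for j in range( i + 1, len( matrix ) // 2 + 1 ):
--             max_numbers.append( max( [ matrix[i][j], matrix[i][ length - j], matrix[ length - i ][j], matrix[ length - i ][ length - j ] ] ) )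
--             max_numbers.append( max( [ matrix[j][i], matrix[j][ length - i ], matrix[ length - j ][i], matrix[ length - j ][ length - i ] ] ) )
--
--
--     return sum( max_numbers )
-- ===== SOURCE B (Python) =====
-- def get_sum_bestdiagonalset(matrix):
--     n = len(matrix)
--     half = n // 2 + 1
--     last = n - 1
--     folded = [[max(a, b) for a, b in zip(matrix[i], matrix[last - i])] for i in range(half)]
--     return sum(max(row[j], row[last - j]) for row in folded for j in range(half))
-- ===== Notes on version B (the rewrite author's own statement) =====
-- stated objective: simpler
-- what changed: A's triangular loop with a diagonal special case and two appends per off-diagonal pair is replaced by two uniform folding passes: fold the matrix onto its top half by elementwise max of mirror rows, then sum the max of mirror columns over each folded row.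
import Mathlib
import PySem

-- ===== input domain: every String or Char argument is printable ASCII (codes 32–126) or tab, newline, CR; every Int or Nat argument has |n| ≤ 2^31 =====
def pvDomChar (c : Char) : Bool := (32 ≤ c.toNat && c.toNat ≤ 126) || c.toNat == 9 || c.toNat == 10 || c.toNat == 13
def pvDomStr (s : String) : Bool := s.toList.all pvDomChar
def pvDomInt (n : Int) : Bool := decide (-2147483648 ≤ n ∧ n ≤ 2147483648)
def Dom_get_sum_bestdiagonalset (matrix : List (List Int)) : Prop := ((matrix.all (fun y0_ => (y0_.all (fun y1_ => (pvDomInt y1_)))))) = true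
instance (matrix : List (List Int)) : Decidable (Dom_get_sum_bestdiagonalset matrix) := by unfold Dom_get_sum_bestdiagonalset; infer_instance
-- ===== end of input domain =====

-- B replaces A's triangular loop (diagonal special case + two appends per off-diagonal pair)
-- by folding the matrix onto its top rows with elementwise max and then folding each such row
-- onto its left half — same exact sum, a simpler decomposition (objective: simpler).

-- ===== PORT A =====
-- matrix[i][j]: total with defaults; exact whenever the index is in range (guaranteed by Pre_).
def pvAt (m : List (List Int)) (i j : Int) : Int :=
  PySem.List.pyGetD (PySem.List.pyGetD m i []) j 0

-- Python max([a,b,c,d]) = left fold of binary max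
def pvMax4 (a b c d : Int) : Int := max (max (max a b) c) d

def get_sum_bestdiagonalset (matrix : List (List Int)) : Int :=
  let length : Int := (matrix.length : Int) - 1
  let half : Int := PySem.Int.floordiv (matrix.length : Int) 2 + 1
  let max_numbers : List Int :=
    (PySem.List.pyRange 0 half 1).foldl (fun acc i =>
      let acc := acc ++ [pvMax4 (pvAt matrix i i) (pvAt matrix i (length - i))
                           (pvAt matrix (length - i) i) (pvAt matrix (length - i) (length - i))]
      (PySem.List.pyRange (i + 1) half 1).foldl (fun acc j =>
        (acc ++ [pvMax4 (pvAt matrix i j) (pvAt matrix i (length - j))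
                   (pvAt matrix (length - i) j) (pvAt matrix (length - i) (length - j))])
            ++ [pvMax4 (pvAt matrix j i) (pvAt matrix j (length - i))
                   (pvAt matrix (length - j) i) (pvAt matrix (length - j) (length - i))]) acc) []
  max_numbers.sum

-- ===== PORT B =====
def get_sum_bestdiagonalset_alt (matrix : List (List Int)) : Int :=
  let n : Int := (matrix.length : Int)
  let half : Int := PySem.Int.floordiv n 2 + 1
  let last : Int := n - 1
  let folded : List (List Int) :=
    (PySem.List.pyRange 0 half 1).map (fun i =>
      (List.zip (PySem.List.pyGetD matrix i []) (PySem.List.pyGetD matrix (last - i) [])).map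
        (fun p => max p.1 p.2))
  (folded.map (fun row =>
    ((PySem.List.pyRange 0 half 1).map (fun j =>
      max (PySem.List.pyGetD row j 0) (PySem.List.pyGetD row (last - j) 0))).sum)).sum

-- ===== PRECONDITION & SPEC =====
-- Pre_: exactly where A returns — a nonempty matrix whose every row has at least len(matrix)
-- columns; on an empty matrix or a matrix with a shorter row Python A raises IndexError.
def Pre_get_sum_bestdiagonalset (matrix : List (List Int)) : Prop :=
  matrix ≠ [] ∧ ∀ row ∈ matrix, matrix.length ≤ row.length
instance (matrix : List (List Int)) : Decidable (Pre_get_sum_bestdiagonalset matrix) := by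
  unfold Pre_get_sum_bestdiagonalset; infer_instance

def pvWitness_get_sum_bestdiagonalset : List (List Int) := [[1, 2], [3, 4]]

def Spec_get_sum_bestdiagonalset (matrix : List (List Int)) (out : Int) : Prop := out = get_sum_bestdiagonalset_alt matrix
instance (matrix : List (List Int)) (out : Int) : Decidable (Spec_get_sum_bestdiagonalset matrix out) := by unfold Spec_get_sum_bestdiagonalset; infer_instance

-- ===== CLAIM (what is proved, stated in full; the proofs are below) =====
def Claim_equal_get_sum_bestdiagonalset : Prop := ∀ (matrix : List (List Int)), Dom_get_sum_bestdiagonalset matrix → Pre_get_sum_bestdiagonalset matrix → Spec_get_sum_bestdiagonalset matrix (get_sum_bestdiagonalset matrix)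

-- ===== LEMMAS AND PROOFS =====

-- pvL m = len(matrix) - 1, the mirror offset
def pvL (m : List (List Int)) : Int := (m.length : Int) - 1

-- the value A appends for the ordered pair (i, j): max of the four mirror entries, in A's order
def pvP (m : List (List Int)) (i j : Int) : Int :=
  pvMax4 (pvAt m i j) (pvAt m i (pvL m - j)) (pvAt m (pvL m - i) j) (pvAt m (pvL m - i) (pvL m - j))

lemma pv_sum_flatMap (l : List Int) (g : Int → List Int) :
    (l.flatMap g).sum = (l.map (fun x => (g x).sum)).sum := by
  simp [List.flatMap_def, List.sum_flatten, List.map_map, Function.comp_def]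

-- A's result as a triangular double sum of pvP
lemma pvA_char (m : List (List Int)) :
    get_sum_bestdiagonalset m
    = ((PySem.List.pyRange 0 (PySem.Int.floordiv (m.length : Int) 2 + 1) 1).map
        (fun i => pvP m i i
          + ((PySem.List.pyRange (i + 1) (PySem.Int.floordiv (m.length : Int) 2 + 1) 1).map
              (fun j => pvP m i j + pvP m j i)).sum)).sum := by
  unfold get_sum_bestdiagonalset pvP pvL
  simp only [List.append_assoc, PySem.List.foldl_append_eq_flatMap, List.nil_append,
    pv_sum_flatMap, List.sum_cons, List.sum_nil, List.singleton_append,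
    add_zero]

-- the four-way max is the same however the mirrors are bracketed
lemma pv_max_rearrange (a b c d : Int) : max (max a c) (max b d) = pvMax4 a b c d := by
  unfold pvMax4; omega

-- under Pre_, entry c of B's folded row i is the max of the two mirror entries
lemma pvB_access (m : List (List Int)) (hrows : ∀ row ∈ m, m.length ≤ row.length)
    (i c : Int) (hi0 : 0 ≤ i) (hin : i < (m.length : Int)) (hc0 : 0 ≤ c) (hcn : c < (m.length : Int)) :
    PySem.List.pyGetD
      (List.map (fun p : Int × Int => max p.1 p.2)
        (List.zip (PySem.List.pyGetD m i []) (PySem.List.pyGetD m ((m.length : Int) - 1 - i) []))) c 0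
    = max (pvAt m i c) (pvAt m ((m.length : Int) - 1 - i) c) := by
  have hi' : 0 ≤ (m.length : Int) - 1 - i ∧ (m.length : Int) - 1 - i < (m.length : Int) := by omega
  rw [PySem.List.pyGetD_eq_getElem m [] hi0 hin, PySem.List.pyGetD_eq_getElem m [] hi'.1 hi'.2]
  have h1 : (m.length : Int) ≤ ((m[i.toNat]'(by omega)).length : Int) := by
    exact_mod_cast Int.ofNat_le.mpr (hrows _ (List.getElem_mem _))
  have h2 : (m.length : Int) ≤ ((m[((m.length : Int) - 1 - i).toNat]'(by omega)).length : Int) := by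
    exact_mod_cast Int.ofNat_le.mpr (hrows _ (List.getElem_mem _))
  have hlen : c < ((List.zip (m[i.toNat]'(by omega)) (m[((m.length : Int) - 1 - i).toNat]'(by omega))).map
      (fun p : Int × Int => max p.1 p.2)).length := by
    simp [List.length_zip]; omega
  rw [PySem.List.pyGetD_eq_getElem _ 0 hc0 (by exact_mod_cast hlen)]
  unfold pvAt
  rw [PySem.List.pyGetD_eq_getElem m [] hi0 hin, PySem.List.pyGetD_eq_getElem m [] hi'.1 hi'.2,
    PySem.List.pyGetD_eq_getElem _ 0 hc0 (by omega), PySem.List.pyGetD_eq_getElem _ 0 hc0 (by omega)]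
  simp [List.getElem_zip]

-- B's result as the full square double sum of pvP
lemma pvB_char (m : List (List Int)) (hpre : Pre_get_sum_bestdiagonalset m) :
    get_sum_bestdiagonalset_alt m
    = ((PySem.List.pyRange 0 (PySem.Int.floordiv (m.length : Int) 2 + 1) 1).map
        (fun i => ((PySem.List.pyRange 0 (PySem.Int.floordiv (m.length : Int) 2 + 1) 1).map
          (fun j => pvP m i j)).sum)).sum := by
  obtain ⟨hne, hrows⟩ := hpre
  have hn : 1 ≤ m.length := List.length_pos_iff.mpr hne
  have hh : PySem.Int.floordiv (m.length : Int) 2 = ((m.length / 2 : Nat) : Int) := by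
    exact_mod_cast PySem.Int.floordiv_natCast m.length 2
  have hhn : PySem.Int.floordiv (m.length : Int) 2 + 1 ≤ (m.length : Int) := by
    rw [hh]; have := Nat.div_le_self m.length 2
    have h2 : m.length / 2 < m.length := Nat.div_lt_self (by omega) (by omega)
    omega
  unfold get_sum_bestdiagonalset_alt
  simp only [List.map_map, Function.comp_def]
  refine congrArg List.sum (List.map_congr_left ?_)
  intro i hi
  rw [PySem.List.mem_pyRange_one] at hi
  refine congrArg List.sum (List.map_congr_left ?_)
  intro j hj
  rw [PySem.List.mem_pyRange_one] at hj
  rw [pvB_access m hrows i j hi.1 (by omega) hj.1 (by omega),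
      pvB_access m hrows i ((m.length : Int) - 1 - j) hi.1 (by omega) (by omega) (by omega)]
  unfold pvP pvL
  exact pv_max_rearrange _ _ _ _

lemma pv_tri (f : Int → Int → Int) (H : Nat) :
    ((PySem.List.pyRange 0 (H:Int) 1).map (fun i => ((PySem.List.pyRange 0 (H:Int) 1).map (fun j => f i j)).sum)).sum
    = ((PySem.List.pyRange 0 (H:Int) 1).map (fun i => f i i + ((PySem.List.pyRange (i+1) (H:Int) 1).map (fun j => f i j + f j i)).sum)).sum := by
  induction H with
  | zero => simp [PySem.List.pyRange_one_eq_nil]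
  | succ H ih =>
    have hcast : ((H+1 : Nat) : Int) = (H:Int) + 1 := by push_cast; ring
    have h0H : (0:Int) ≤ (H:Int) := by positivity
    have e2 : List.map (fun i => f i i + (List.map (fun j => f i j + f j i) (PySem.List.pyRange (i + 1) ((H:Int) + 1) 1)).sum) (PySem.List.pyRange 0 (H:Int) 1)
        = List.map (fun i => (f i i + (List.map (fun j => f i j + f j i) (PySem.List.pyRange (i + 1) (H:Int) 1)).sum) + (f i (H:Int) + f (H:Int) i)) (PySem.List.pyRange 0 (H:Int) 1) := by
      refine List.map_congr_left ?_
      intro i hi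
      rw [PySem.List.mem_pyRange_one] at hi
      rw [PySem.List.pyRange_one_succ_right (by omega : i + 1 ≤ (H:Int))]
      simp [List.sum_append]
      ring
    rw [hcast, PySem.List.pyRange_one_succ_right h0H]
    simp only [List.map_append, List.sum_append, List.map_cons, List.map_nil, List.sum_cons,
      List.sum_nil]
    rw [e2,
      PySem.List.sum_map_add_int (PySem.List.pyRange 0 (H:Int) 1)
        (fun i => f i i + (List.map (fun j => f i j + f j i) (PySem.List.pyRange (i + 1) (H:Int) 1)).sum)
        (fun i => f i (H:Int) + f (H:Int) i),
      ← ih,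
      PySem.List.sum_map_add_int (PySem.List.pyRange 0 (H:Int) 1)
        (fun i => f i (H:Int)) (fun i => f (H:Int) i),
      PySem.List.pyRange_one_eq_nil (le_refl ((H:Int)+1))]
    simp
    ring

-- ===== VERDICT (by name: the statement is the Claim_ definition above) =====
theorem get_sum_bestdiagonalset_spec : Claim_equal_get_sum_bestdiagonalset := by
  intro matrix _ hpre
  unfold Spec_get_sum_bestdiagonalset
  rw [pvA_char, pvB_char matrix hpre]
  have hh : PySem.Int.floordiv (matrix.length : Int) 2 + 1 = ((matrix.length / 2 + 1 : Nat) : Int) := by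
    have := PySem.Int.floordiv_natCast matrix.length 2
    push_cast at this ⊢
    omega
  rw [hh]
  exact (pv_tri (pvP matrix) (matrix.length / 2 + 1)).symm
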